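-- pv_equiv track=rewrite | github.com/jchddd/scripts | jworkflow/Jworkflow/utility.py | num_to_subscript
-- ===== SOURCE A (Python) =====
-- def num_to_subscript(string, neglect_list=['1']):
--     '''
--     Function that converts not alpha in a string to a subscript format and returns a string that can be used in Markdown
--
--     Parameters:
--         - string: String that need to convert / str
--         - neglect_list: String that will be ignore and delete from the result / array-like, defaule ['1']
--     Return:
--         - The new str after processing
--     Example:
--         - num_to_subscript('Ru3Cu2.2') -> 'Ru$_{3}$Cu$_{2.2}$'
--     '''
--     str_new = ''
--     digit_store = ''
--     for i, s in enumerate(string):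
--         if s.isalpha():
--             if len(digit_store) == 0:
--                 str_new += s
--             elif len(digit_store) != 0:
--                 str_new += '$_{' + digit_store + '}$'
--                 str_new += s
--                 digit_store = ''
--         elif not s.isalpha():
--             if s in neglect_list:
--                 pass
--             else:
--                 digit_store += s
--             if i + 1 == len(string):
--                 str_new += '$_{' + digit_store + '}$'
--     return str_new
-- ===== SOURCE B (Python) =====
-- def num_to_subscript(string, neglect_list=['1']):
--     pieces = []
--     i, n = 0, len(string)
--     while i < n:
--         alpha = string[i].isalpha()
--         j = i + 1
--         while j < n and string[j].isalpha() == alpha: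
--             j += 1
--         run = string[i:j]
--         if alpha:
--             pieces.append(run)
--         else:
--             cleaned = ''.join(c for c in run if c not in neglect_list)
--             if cleaned:
--                 pieces.append('$_{' + cleaned + '}$')
--         i = j
--     return ''.join(pieces)
-- ===== Notes on version B (the rewrite author's own statement) =====
-- stated objective: alternative
-- what changed: Replaces A's char-by-char scan with two growing accumulator strings by a run-based pass: scan maximal alpha/non-alpha runs, emit alpha runs verbatim and each non-alpha run as a subscript piece only when it is non-empty after removing neglected characters, joining the pieces at the end.
-- intended difference: On strings whose trailing non-alpha run consists entirely of neglected characters, A appends a useless empty subscript (num_to_subscript('Ru1') returns 'Ru$_{}$') while B omits it and returns 'Ru', the intended Markdown output. — e.g. on num_to_subscript("Ru1", ["1"]): A returns "Ru$_{}$", B returns "Ru"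
import Mathlib
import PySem

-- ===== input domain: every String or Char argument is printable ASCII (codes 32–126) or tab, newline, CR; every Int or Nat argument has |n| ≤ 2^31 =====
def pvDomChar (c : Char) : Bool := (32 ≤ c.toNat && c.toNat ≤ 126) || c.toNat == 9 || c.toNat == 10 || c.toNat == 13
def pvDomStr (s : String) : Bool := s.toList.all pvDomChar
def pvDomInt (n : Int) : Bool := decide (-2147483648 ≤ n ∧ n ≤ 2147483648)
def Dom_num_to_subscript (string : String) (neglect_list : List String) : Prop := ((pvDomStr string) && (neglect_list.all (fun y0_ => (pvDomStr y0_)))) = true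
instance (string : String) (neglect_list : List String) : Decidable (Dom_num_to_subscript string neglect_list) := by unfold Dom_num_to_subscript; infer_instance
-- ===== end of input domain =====

-- B replaces A's char-by-char accumulator scan by a run-based grouping pass; B drops A's
-- useless empty trailing subscript '$_{}$' (stated as the intended difference D_ below).

-- ===== PORT A =====
def num_to_subscript (string : String) (neglect_list : List String) : String :=
  let cs := string.toList
  let r := (PySem.List.enumerate cs).foldl
    (fun (acc : List Char × List Char) (is : Int × Char) =>
      if PySem.Chars.isalpha is.2 then
        (if acc.2.length = 0 then (acc.1 ++ [is.2], acc.2)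
         else (acc.1 ++ ('$' :: '_' :: '{' :: acc.2 ++ ['}', '$']) ++ [is.2], []))
      else
        let ds := if neglect_list.contains (String.ofList [is.2]) then acc.2 else acc.2 ++ [is.2]
        if is.1 + 1 = PySem.List.len cs then (acc.1 ++ ('$' :: '_' :: '{' :: ds ++ ['}', '$']), ds)
        else (acc.1, ds))
    ([], [])
  String.ofList r.1

-- ===== PORT B =====
def nsSub (ds : List Char) : List Char := '$' :: '_' :: '{' :: ds ++ ['}', '$']

-- Source B's run scan; the fuel (initially the length, strictly above every suffix reached) only
-- makes the recursion on the remaining suffix structural, it never changes the computation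
def nsRuns (neglect_list : List String) : Nat → List Char → List Char
  | 0, _ => []
  | _ + 1, [] => []
  | fuel + 1, c :: rest =>
    let a := PySem.Chars.isalpha c
    let run := c :: rest.takeWhile (fun x => PySem.Chars.isalpha x == a)
    let rest' := rest.dropWhile (fun x => PySem.Chars.isalpha x == a)
    (if a then run
     else
       let cleaned := run.filter (fun x => !(neglect_list.contains (String.ofList [x])))
       if cleaned.isEmpty then [] else nsSub cleaned) ++ nsRuns neglect_list fuel rest'

def num_to_subscript_alt (string : String) (neglect_list : List String) : String :=
  String.ofList (nsRuns neglect_list string.toList.length string.toList)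

-- ===== PRECONDITION & SPEC =====
-- On strings whose trailing non-alpha run consists entirely of neglected characters, A appends a
-- useless empty subscript '$_{}$' (e.g. 'Ru1' -> 'Ru$_{}$') while B omits it, the intended output.
def D_num_to_subscript (string : String) (neglect_list : List String) : Prop :=
  let tr := string.toList.reverse.takeWhile (fun c => !(PySem.Chars.isalpha c))
  tr ≠ [] ∧ tr.filter (fun c => !(neglect_list.contains (String.ofList [c]))) = []
instance (string : String) (neglect_list : List String) : Decidable (D_num_to_subscript string neglect_list) := by unfold D_num_to_subscript; infer_instance

def Spec_num_to_subscript (string : String) (neglect_list : List String) (out : String) : Prop := ¬ D_num_to_subscript string neglect_list → out = num_to_subscript_alt string neglect_list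
instance (string : String) (neglect_list : List String) (out : String) : Decidable (Spec_num_to_subscript string neglect_list out) := by unfold Spec_num_to_subscript; infer_instance

def pvDiffWitness_num_to_subscript : String × List String := ("Ru1", ["1"])
def pvDiffWitnessOut_num_to_subscript : String × String := ("Ru$_{}$", "Ru")

-- ===== CLAIM (what is proved, stated in full; the proofs are below) =====
def Claim_unchanged_num_to_subscript : Prop := ∀ (string : String) (neglect_list : List String), Dom_num_to_subscript string neglect_list → Spec_num_to_subscript string neglect_list (num_to_subscript string neglect_list)
def Claim_changed_num_to_subscript : Prop := Dom_num_to_subscript (pvDiffWitness_num_to_subscript.1) (pvDiffWitness_num_to_subscript.2) ∧ D_num_to_subscript (pvDiffWitness_num_to_subscript.1) (pvDiffWitness_num_to_subscript.2) ∧ num_to_subscript (pvDiffWitness_num_to_subscript.1) (pvDiffWitness_num_to_subscript.2) = pvDiffWitnessOut_num_to_subscript.1 ∧ num_to_subscript_alt (pvDiffWitness_num_to_subscript.1) (pvDiffWitness_num_to_subscript.2) = pvDiffWitnessOut_num_to_subscript.2 ∧ pvDiffWitnessOut_num_to_subscript.1 ≠ pvDiffWitnessOut_num_to_subscript.2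
def Claim_exact_num_to_subscript : Prop := ∀ (string : String) (neglect_list : List String), Dom_num_to_subscript string neglect_list → D_num_to_subscript string neglect_list → num_to_subscript string neglect_list ≠ num_to_subscript_alt string neglect_list

-- ===== LEMMAS AND PROOFS =====

-- proof-side helpers: char-wise reference recursions for both programs
def nsUpd (nl : List String) (d : List Char) (c : Char) : List Char :=
  if nl.contains (String.ofList [c]) then d else d ++ [c]

def nsFlush (d : List Char) : List Char := if d = [] then [] else nsSub d

-- A char-wise: flush before an alpha char; unconditional flush at the last char if non-alpha
def nsAref (nl : List String) : List Char → List Char → List Char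
  | _, [] => []
  | d, [c] => if PySem.Chars.isalpha c then nsFlush d ++ [c] else nsSub (nsUpd nl d c)
  | d, c :: c' :: cs =>
    if PySem.Chars.isalpha c then nsFlush d ++ c :: nsAref nl [] (c' :: cs)
    else nsAref nl (nsUpd nl d c) (c' :: cs)

-- B char-wise: flush (only if non-empty) before an alpha char and at the end
def nsBref (nl : List String) : List Char → List Char → List Char
  | d, [] => nsFlush d
  | d, c :: cs =>
    if PySem.Chars.isalpha c then nsFlush d ++ c :: nsBref nl [] cs
    else nsBref nl (nsUpd nl d c) cs

-- whether A emits an extra '$_{}$' beyond B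
def nsE (nl : List String) : List Char → List Char → Bool
  | _, [] => false
  | d, [c] => if PySem.Chars.isalpha c then false else (nsUpd nl d c).isEmpty
  | d, c :: c' :: cs =>
    if PySem.Chars.isalpha c then nsE nl [] (c' :: cs) else nsE nl (nsUpd nl d c) (c' :: cs)

-- closed form of nsE
def nsEC (nl : List String) (d : List Char) (cs : List Char) : Bool :=
  let tr := cs.reverse.takeWhile (fun c => !(PySem.Chars.isalpha c))
  !tr.isEmpty && (tr.filter (fun c => !(nl.contains (String.ofList [c])))).isEmpty
    && (!(cs.all (fun c => !(PySem.Chars.isalpha c))) || d.isEmpty)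

-- the A-port's per-char step without the last-index flush, and the fold's characterisation
def nsStep (nl : List String) (acc : List Char × List Char) (s : Char) : List Char × List Char :=
  if PySem.Chars.isalpha s then
    (if acc.2.length = 0 then (acc.1 ++ [s], acc.2)
     else (acc.1 ++ ('$' :: '_' :: '{' :: acc.2 ++ ['}', '$']) ++ [s], []))
  else (acc.1, if nl.contains (String.ofList [s]) then acc.2 else acc.2 ++ [s])

def nsBody (nl : List String) : List Char → List Char → List Char
  | _, [] => []
  | d, c :: cs =>
    if PySem.Chars.isalpha c then nsFlush d ++ c :: nsBody nl [] cs
    else nsBody nl (nsUpd nl d c) cs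

def nsFin (nl : List String) : List Char → List Char → List Char
  | d, [] => d
  | d, c :: cs => if PySem.Chars.isalpha c then nsFin nl [] cs else nsFin nl (nsUpd nl d c) cs

lemma foldl_nsStep (nl : List String) : ∀ (cs : List Char) (n d : List Char),
    cs.foldl (nsStep nl) (n, d) = (n ++ nsBody nl d cs, nsFin nl d cs) := by
  intro cs
  induction cs with
  | nil => intro n d; simp [nsBody, nsFin]
  | cons c cs ih =>
    intro n d
    by_cases hc : PySem.Chars.isalpha c
    · by_cases hd : d = []
      · subst hd
        simp [List.foldl_cons, nsStep, hc, ih, nsBody, nsFin, nsFlush]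
      · simp [List.foldl_cons, nsStep, hc, hd, List.length_eq_zero_iff, ih, nsBody, nsFin,
          nsFlush, nsSub]
    · simp [List.foldl_cons, nsStep, hc, ih, nsBody, nsFin, nsUpd]

lemma nsAref_cons₂ (nl : List String) (d : List Char) (c : Char) (cs : List Char) (h : cs ≠ []) :
    nsAref nl d (c :: cs) =
      if PySem.Chars.isalpha c then nsFlush d ++ c :: nsAref nl [] cs
      else nsAref nl (nsUpd nl d c) cs := by
  cases cs with
  | nil => exact absurd rfl h
  | cons c' cs' => rfl

lemma nsE_cons₂ (nl : List String) (d : List Char) (c : Char) (cs : List Char) (h : cs ≠ []) :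
    nsE nl d (c :: cs) =
      if PySem.Chars.isalpha c then nsE nl [] cs else nsE nl (nsUpd nl d c) cs := by
  cases cs with
  | nil => exact absurd rfl h
  | cons c' cs' => rfl

lemma nsAref_snoc (nl : List String) : ∀ (xs : List Char) (d : List Char) (x : Char),
    nsAref nl d (xs ++ [x]) =
      nsBody nl d xs ++
        (if PySem.Chars.isalpha x then nsFlush (nsFin nl d xs) ++ [x]
         else nsSub (nsUpd nl (nsFin nl d xs) x)) := by
  intro xs
  induction xs with
  | nil => intro d x; simp [nsAref, nsBody, nsFin]
  | cons c cs ih =>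
    intro d x
    rw [List.cons_append, nsAref_cons₂ nl d c (cs ++ [x]) (by simp)]
    by_cases hc : PySem.Chars.isalpha c
    · simp [hc, ih, nsBody, nsFin]
    · simp [hc, ih, nsBody, nsFin]

-- the A port computes nsAref
lemma portA_eq (s : String) (nl : List String) :
    num_to_subscript s nl = String.ofList (nsAref nl [] s.toList) := by
  unfold num_to_subscript
  refine congrArg String.ofList ?_
  generalize s.toList = cs
  cases cs using List.reverseRecOn with
  | nil => simp [PySem.List.enumerate_nil, nsAref]
  | append_singleton xs x =>
    rw [PySem.List.enumerate_append, PySem.List.enumerate_cons, PySem.List.enumerate_nil,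
      List.foldl_append]
    have hcongr :
        (PySem.List.enumerate xs 0).foldl
          (fun (acc : List Char × List Char) (is : Int × Char) =>
            if PySem.Chars.isalpha is.2 then
              (if acc.2.length = 0 then (acc.1 ++ [is.2], acc.2)
               else (acc.1 ++ ('$' :: '_' :: '{' :: acc.2 ++ ['}', '$']) ++ [is.2], []))
            else
              let ds := if nl.contains (String.ofList [is.2]) then acc.2 else acc.2 ++ [is.2]
              if is.1 + 1 = PySem.List.len (xs ++ [x]) then
                (acc.1 ++ ('$' :: '_' :: '{' :: ds ++ ['}', '$']), ds)
              else (acc.1, ds)) ([], []) =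
        (PySem.List.enumerate xs 0).foldl (fun acc is => nsStep nl acc is.2) ([], []) := by
      refine PySem.List.foldl_congr_mem _ _ _ _ (fun acc is hmem => ?_)
      rcases (PySem.List.mem_enumerate_iff xs 0 is).1 hmem with ⟨k, hk, rfl⟩
      have hne : (0 : Int) + k + 1 ≠ PySem.List.len (xs ++ [x]) := by
        simp only [PySem.List.len_eq, List.length_append, List.length_singleton]
        push_cast
        omega
      simp only [nsStep, hne, if_false]
    rw [hcongr]
    have hfold : (PySem.List.enumerate xs 0).foldl (fun acc is => nsStep nl acc is.2) ([], []) =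
        xs.foldl (nsStep nl) ([], []) := by
      conv_rhs => rw [← PySem.List.map_snd_enumerate xs 0]
      rw [List.foldl_map]
    rw [hfold, foldl_nsStep, nsAref_snoc]
    by_cases hx : PySem.Chars.isalpha x
    · by_cases hfin : nsFin nl [] xs = []
      · simp [hx, hfin, nsFlush]
      · simp [hx, hfin, List.length_eq_zero_iff, nsFlush, nsSub]
    · simp [hx, nsUpd, nsSub]

-- A = B ++ extra
lemma nsAref_eq_nsBref (nl : List String) : ∀ (d cs : List Char), cs ≠ [] →
    nsAref nl d cs = nsBref nl d cs ++ (if nsE nl d cs then nsSub [] else []) := by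
  intro d cs
  induction d, cs using nsAref.induct nl with
  | case1 d => intro h; exact absurd rfl h
  | case2 d c hc =>
    intro _
    simp [nsAref, nsBref, nsE, hc, nsFlush]
  | case3 d c hc =>
    intro _
    rw [Bool.not_eq_true] at hc
    by_cases hu : nsUpd nl d c = []
    · simp [nsAref, nsBref, nsE, hc, hu, nsFlush, List.isEmpty_iff]
    · simp [nsAref, nsBref, nsE, hc, hu, nsFlush]
  | case4 d c c' cs hc ih =>
    intro _
    rw [nsAref_cons₂ nl d c (c' :: cs) (by simp), nsE_cons₂ nl d c (c' :: cs) (by simp)]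
    simp only [hc, if_true, nsBref, ih (by simp)]
    simp
  | case5 d c c' cs hc ih =>
    intro _
    rw [Bool.not_eq_true] at hc
    rw [nsAref_cons₂ nl d c (c' :: cs) (by simp), nsE_cons₂ nl d c (c' :: cs) (by simp)]
    simp only [hc, Bool.false_eq_true, if_false, nsBref, ih (by simp)]

-- B's run recursion equals the char-wise nsBref
lemma nsBref_alpha_run (nl : List String) : ∀ (run : List Char),
    (∀ c ∈ run, PySem.Chars.isalpha c = true) → ∀ cs,
    nsBref nl [] (run ++ cs) = run ++ nsBref nl [] cs := by
  intro run
  induction run with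
  | nil => intro _ cs; simp
  | cons c rest ih =>
    intro h cs
    have hc := h c (by simp)
    simp only [List.cons_append, nsBref, hc, if_true, nsFlush]
    simp [ih (fun x hx => h x (by simp [hx])) cs]

lemma nsBref_nonalpha_run (nl : List String) : ∀ (run : List Char) (d cs : List Char),
    (∀ c ∈ run, PySem.Chars.isalpha c = false) →
    (cs = [] ∨ ∃ c' cs', cs = c' :: cs' ∧ PySem.Chars.isalpha c' = true) →
    nsBref nl d (run ++ cs) =
      nsFlush (d ++ run.filter (fun x => !(nl.contains (String.ofList [x])))) ++ nsBref nl [] cs := by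
  intro run
  induction run with
  | nil =>
    intro d cs _ hcs
    rcases hcs with rfl | ⟨c', cs', rfl, hc'⟩
    · simp [nsBref, nsFlush]
    · simp [nsBref, hc', nsFlush]
  | cons c rest ih =>
    intro d cs h hcs
    have hc := h c (by simp)
    simp only [List.cons_append, nsBref, hc, Bool.false_eq_true, if_false]
    rw [ih (nsUpd nl d c) cs (fun x hx => h x (by simp [hx])) hcs]
    by_cases hmem : nl.contains (String.ofList [c])
    · simp only [nsUpd, hmem, if_true, List.filter_cons, Bool.not_eq_true']
      simp
    · simp only [nsUpd, hmem, Bool.false_eq_true, if_false, List.filter_cons]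
      simp

lemma dropWhile_head_cases {α : Type} (p : α → Bool) (l : List α) :
    l.dropWhile p = [] ∨ ∃ c cs, l.dropWhile p = c :: cs ∧ p c = false := by
  cases h : l.dropWhile p with
  | nil => exact Or.inl rfl
  | cons c cs =>
    refine Or.inr ⟨c, cs, rfl, ?_⟩
    have := List.head?_dropWhile_not p l
    rw [h] at this
    exact this

lemma nsRuns_eq_nsBref (nl : List String) : ∀ (fuel : Nat) (cs : List Char),
    cs.length ≤ fuel → nsRuns nl fuel cs = nsBref nl [] cs := by
  intro fuel
  induction fuel with
  | zero =>
    intro cs hcs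
    rw [List.length_eq_zero_iff.mp (Nat.le_zero.mp hcs)]
    simp [nsRuns, nsBref, nsFlush]
  | succ fuel ih =>
    intro cs hcs
    cases cs with
    | nil => simp [nsRuns, nsBref, nsFlush]
    | cons c rest =>
      by_cases hc : PySem.Chars.isalpha c
      · have hp : (fun x => PySem.Chars.isalpha x == PySem.Chars.isalpha c)
            = (fun x => PySem.Chars.isalpha x) := funext fun x => by simp [hc]
        rw [nsRuns, hp]
        simp only [hc, if_true]
        have hlen : (rest.dropWhile (fun x => PySem.Chars.isalpha x)).length ≤ fuel := by
          have h1 := List.length_dropWhile_le (fun x => PySem.Chars.isalpha x) rest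
          simp only [List.length_cons] at hcs
          omega
        rw [ih _ hlen]
        conv_rhs => rw [show c :: rest
            = (c :: rest.takeWhile (fun x => PySem.Chars.isalpha x))
              ++ rest.dropWhile (fun x => PySem.Chars.isalpha x) from by
          rw [List.cons_append, List.takeWhile_append_dropWhile]]
        rw [nsBref_alpha_run nl _ (by
          intro x hx
          rw [List.mem_cons] at hx
          rcases hx with rfl | hx
          · exact hc
          · exact List.mem_takeWhile_imp hx)]
      · rw [Bool.not_eq_true] at hc
        have hp : (fun x => PySem.Chars.isalpha x == PySem.Chars.isalpha c)
            = (fun x => !(PySem.Chars.isalpha x)) := funext fun x => by simp [hc]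
        rw [nsRuns, hp]
        simp only [hc, Bool.false_eq_true, if_false]
        have hlen : (rest.dropWhile (fun x => !(PySem.Chars.isalpha x))).length ≤ fuel := by
          have h1 := List.length_dropWhile_le (fun x => !(PySem.Chars.isalpha x)) rest
          simp only [List.length_cons] at hcs
          omega
        rw [ih _ hlen]
        conv_rhs => rw [show c :: rest
            = (c :: rest.takeWhile (fun x => !(PySem.Chars.isalpha x)))
              ++ rest.dropWhile (fun x => !(PySem.Chars.isalpha x)) from by
          rw [List.cons_append, List.takeWhile_append_dropWhile]]
        rw [nsBref_nonalpha_run nl _ [] _ (by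
            intro x hx
            rw [List.mem_cons] at hx
            rcases hx with rfl | hx
            · exact hc
            · have := List.mem_takeWhile_imp hx
              simpa using this)
          (by
            rcases dropWhile_head_cases (fun x => !(PySem.Chars.isalpha x)) rest with h | ⟨c', cs', heq, hp'⟩
            · exact Or.inl h
            · refine Or.inr ⟨c', cs', heq, ?_⟩
              simpa using hp')]
        rw [List.nil_append]
        congr 1
        by_cases hclean : ((c :: rest.takeWhile (fun x => !(PySem.Chars.isalpha x))).filter
            (fun x => !(nl.contains (String.ofList [x])))) = []
        · rw [hclean]
          simp [nsFlush]
        · rw [if_neg (by simpa [List.isEmpty_iff] using hclean)]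
          rw [nsFlush, if_neg hclean]

-- transfer lemmas for the closed form nsEC
lemma nsEC_cons_alpha (nl : List String) (d : List Char) (c : Char) (cs : List Char)
    (hc : PySem.Chars.isalpha c = true) (_hcs : cs ≠ []) :
    nsEC nl d (c :: cs) = nsEC nl [] cs := by
  unfold nsEC
  simp only [List.reverse_cons, List.takeWhile_append]
  by_cases hall : (cs.reverse.takeWhile (fun x => !(PySem.Chars.isalpha x))).length = cs.length
  · have heq : cs.reverse.takeWhile (fun x => !(PySem.Chars.isalpha x)) = cs.reverse :=
      (List.takeWhile_prefix _).eq_of_length (by rw [List.length_reverse]; exact hall)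
    have hallq : cs.all (fun x => !(PySem.Chars.isalpha x)) = true := by
      rw [← List.all_reverse, List.all_eq_true]
      intro x hx
      have hx' : x ∈ cs.reverse.takeWhile (fun x => !(PySem.Chars.isalpha x)) := by
        rw [heq]; exact hx
      exact List.mem_takeWhile_imp (p := fun x => !(PySem.Chars.isalpha x)) hx'
    simp [heq, hc, hallq]
  · have hallq : cs.all (fun x => !(PySem.Chars.isalpha x)) = false := by
      by_contra h
      rw [Bool.not_eq_false, ← List.all_reverse, List.all_eq_true] at h
      apply hall
      rw [List.takeWhile_eq_self_iff.mpr h, List.length_reverse]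
    simp [hall, hc, hallq]

lemma nsEC_cons_nonalpha (nl : List String) (d : List Char) (c : Char) (cs : List Char)
    (hc : PySem.Chars.isalpha c = false) (hcs : cs ≠ []) :
    nsEC nl d (c :: cs) = nsEC nl (nsUpd nl d c) cs := by
  have hcsE : cs.isEmpty = false := by
    cases cs with
    | nil => exact absurd rfl hcs
    | cons _ _ => rfl
  unfold nsEC
  simp only [List.reverse_cons, List.takeWhile_append]
  by_cases hall : (cs.reverse.takeWhile (fun x => !(PySem.Chars.isalpha x))).length = cs.length
  · have heq : cs.reverse.takeWhile (fun x => !(PySem.Chars.isalpha x)) = cs.reverse :=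
      (List.takeWhile_prefix _).eq_of_length (by rw [List.length_reverse]; exact hall)
    have hallq : cs.all (fun x => !(PySem.Chars.isalpha x)) = true := by
      rw [← List.all_reverse, List.all_eq_true]
      intro x hx
      have hx' : x ∈ cs.reverse.takeWhile (fun x => !(PySem.Chars.isalpha x)) := by
        rw [heq]; exact hx
      exact List.mem_takeWhile_imp (p := fun x => !(PySem.Chars.isalpha x)) hx'
    have hrev : cs.reverse ≠ [] := by simpa using hcs
    have hne : ∀ (l : List Char), (l ++ [c]).isEmpty = false := fun l => by simp
    by_cases hmem : String.ofList [c] ∈ nl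
    · simp [heq, hc, hallq, hcsE, nsUpd, hmem, List.filter_append, hne]
    · simp [heq, hc, hallq, hcsE, nsUpd, hmem, List.filter_append, hne]
  · have hallq : cs.all (fun x => !(PySem.Chars.isalpha x)) = false := by
      by_contra h
      rw [Bool.not_eq_false, ← List.all_reverse, List.all_eq_true] at h
      apply hall
      rw [List.takeWhile_eq_self_iff.mpr h, List.length_reverse]
    simp [hall, hc, hallq]

lemma nsE_eq_nsEC (nl : List String) : ∀ (d cs : List Char), nsE nl d cs = nsEC nl d cs := by
  intro d cs
  induction d, cs using nsE.induct nl with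
  | case1 d => simp [nsE, nsEC]
  | case2 d c hc =>
    simp [nsE, nsEC, hc]
  | case3 d c hc =>
    rw [Bool.not_eq_true] at hc
    by_cases hmem : String.ofList [c] ∈ nl
    · simp [nsE, nsEC, hc, nsUpd, hmem]
    · simp [nsE, nsEC, hc, nsUpd, hmem]
  | case4 d c c' cs hc ih =>
    rw [nsE_cons₂ nl d c (c' :: cs) (by simp), nsEC_cons_alpha nl d c (c' :: cs) hc (by simp)]
    simp [hc, ih]
  | case5 d c c' cs hc ih =>
    rw [Bool.not_eq_true] at hc
    rw [nsE_cons₂ nl d c (c' :: cs) (by simp), nsEC_cons_nonalpha nl d c (c' :: cs) hc (by simp)]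
    simp [hc, ih]

lemma D_iff_nsEC (s : String) (nl : List String) :
    D_num_to_subscript s nl ↔ nsEC nl [] s.toList = true := by
  unfold D_num_to_subscript nsEC
  simp [List.isEmpty_iff]

theorem num_to_subscript_spec : Claim_unchanged_num_to_subscript := by
  intro s nl _ hnD
  rw [portA_eq]
  unfold num_to_subscript_alt
  refine congrArg String.ofList ?_
  rw [nsRuns_eq_nsBref nl _ _ (le_refl _)]
  cases hcs : s.toList with
  | nil => simp [nsAref, nsBref, nsFlush]
  | cons c cs =>
    rw [← hcs, nsAref_eq_nsBref nl [] s.toList (by simp [hcs])]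
    have hE : nsE nl [] s.toList = false := by
      rw [nsE_eq_nsEC]
      by_contra h
      rw [Bool.not_eq_false] at h
      exact hnD ((D_iff_nsEC s nl).mpr h)
    simp [hE]

theorem num_to_subscript_changed : Claim_changed_num_to_subscript := by
  unfold Claim_changed_num_to_subscript
  refine ⟨by decide, by decide, by decide, ?_, by decide⟩
  show num_to_subscript_alt "Ru1" ["1"] = "Ru"
  decide

theorem num_to_subscript_tight : Claim_exact_num_to_subscript := by
  intro s nl _ hD h
  have hE : nsE nl [] s.toList = true := by
    rw [nsE_eq_nsEC]
    exact (D_iff_nsEC s nl).mp hD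
  have hne : s.toList ≠ [] := by
    intro h0
    rcases hD with ⟨htr, -⟩
    rw [h0] at htr
    simp at htr
  rw [portA_eq] at h
  unfold num_to_subscript_alt at h
  rw [nsRuns_eq_nsBref nl _ _ (le_refl _)] at h
  have hlists := String.ofList_inj.mp h
  rw [nsAref_eq_nsBref nl [] s.toList hne, hE, if_pos rfl] at hlists
  have := congrArg List.length hlists
  simp [nsSub] at this
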